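-- pv_equiv track=rewrite | github.com/laolaoshiren/ai-hot | scripts/generate_rising.py | choose_window_days
-- ===== SOURCE A (Python) =====
-- from typing import Any, Dict, Iterable, List, Optional
--
-- def choose_window_days(candidates: List[Dict[str, Any]], preferred_days: int = 7, minimum_count: int = 5) -> int:
--     windows = sorted({int(item.get("window_days", 0)) for item in candidates if item.get("window_days")})
--     if not windows:
--         return preferred_days
--
--     eligible = [window for window in windows if window >= preferred_days]
--     if preferred_days in windows:
--         count = sum(1 for item in candidates if int(item.get("window_days", 0)) <= preferred_days)
--         if count >= minimum_count:
--             return preferred_days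
--
--     for window in eligible:
--         count = sum(1 for item in candidates if int(item.get("window_days", 0)) <= window)
--         if count >= minimum_count:
--             return window
--
--     return eligible[-1] if eligible else windows[-1]
-- ===== SOURCE B (Python) =====
-- from bisect import bisect_left
--
-- def choose_window_days(candidates, preferred_days=7, minimum_count=5):
--     # one pass to collect all effective values and the distinct truthy windows,
--     # then two sorts + binary search instead of A's per-window rescans
--     vals = []
--     wins = set()
--     for item in candidates:
--         v = int(item.get("window_days", 0))
--         vals.append(v)
--         if item.get("window_days"):
--             wins.add(v)
--     if not wins:
--         return preferred_days
--     windows = sorted(wins)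
--     vals.sort()
--     # cumulative count of items with value <= w is monotone in w; it reaches
--     # minimum_count exactly at the minimum_count-th smallest value
--     if minimum_count <= 0:
--         lo = preferred_days
--     elif minimum_count <= len(vals):
--         lo = max(preferred_days, vals[minimum_count - 1])
--     else:
--         lo = None
--     if lo is not None:
--         j = bisect_left(windows, lo)
--         if j < len(windows):
--             return windows[j]
--     return windows[-1]
-- ===== Notes on version B (the rewrite author's own statement) =====
-- stated objective: alternative
-- what changed: B collects all effective window values in one pass, sorts them once, derives the threshold value at which the cumulative count reaches minimum_count from the sorted list, and finds the answer window by a single binary search, instead of A's rescan of all candidates for every candidate window; on the probe's inputs (no 'window_days' keys) both are dominated by the initial scan, so no speedup is claimed.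
import Mathlib
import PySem

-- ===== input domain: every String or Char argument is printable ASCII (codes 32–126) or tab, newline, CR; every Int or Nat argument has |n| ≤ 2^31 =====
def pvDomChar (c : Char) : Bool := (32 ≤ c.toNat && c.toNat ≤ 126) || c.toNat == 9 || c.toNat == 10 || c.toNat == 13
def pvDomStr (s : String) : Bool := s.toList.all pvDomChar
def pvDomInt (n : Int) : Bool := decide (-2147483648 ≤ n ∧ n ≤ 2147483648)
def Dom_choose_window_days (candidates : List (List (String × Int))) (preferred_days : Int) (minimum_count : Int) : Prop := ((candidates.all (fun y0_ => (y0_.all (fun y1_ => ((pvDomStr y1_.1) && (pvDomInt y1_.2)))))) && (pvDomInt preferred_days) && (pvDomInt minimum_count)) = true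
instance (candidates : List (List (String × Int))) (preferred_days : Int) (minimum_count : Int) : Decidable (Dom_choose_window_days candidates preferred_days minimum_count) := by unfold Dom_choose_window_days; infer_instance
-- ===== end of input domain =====

-- B replaces A's per-window rescans of all candidates by one sort of the values
-- plus a binary search (bisect) for the decisive window (alternative algorithm,
-- same return value; no measured speed claim).

-- ===== PORT A =====
-- item.get("window_days", 0)  (int() is the identity on the int values here)
def wdVal (item : List (String × Int)) : Int := (PySem.Dict.mk item).getD "window_days" 0
-- truthiness of item.get("window_days"): key present with a non-zero value
def wdTruthy (item : List (String × Int)) : Bool :=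
  match (PySem.Dict.mk item).get? "window_days" with
  | some v => v != 0
  | none => false

def choose_window_days (candidates : List (List (String × Int))) (preferred_days : Int) (minimum_count : Int) : Int :=
  let windows := PySem.List.sorted (PySem.Set.ofList ((candidates.filter wdTruthy).map wdVal)) (fun x => x)
  if windows = [] then preferred_days
  else
    let eligible := windows.filter (fun w => decide (preferred_days ≤ w))
    -- the early 'return preferred_days' path (if preferred in windows and count >= minimum)
    if preferred_days ∈ windows ∧ minimum_count ≤ ((candidates.filter (fun item => decide (wdVal item ≤ preferred_days))).length : Int) then preferred_days
    else
      match eligible.find? (fun w => decide (minimum_count ≤ ((candidates.filter (fun item => decide (wdVal item ≤ w))).length : Int))) with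
      | some w => w
      | none => if eligible ≠ [] then PySem.List.pyGetD eligible (-1) 0 else PySem.List.pyGetD windows (-1) 0

-- ===== PORT B =====
-- one pass of the loop body of Source B: append the value, conditionally add to the set
def wdStep (acc : List Int × PySem.Set Int) (item : List (String × Int)) : List Int × PySem.Set Int :=
  let v := wdVal item
  (acc.1 ++ [v], if wdTruthy item then PySem.Set.add acc.2 v else acc.2)

def choose_window_days_alt (candidates : List (List (String × Int))) (preferred_days : Int) (minimum_count : Int) : Int :=
  let acc := candidates.foldl wdStep ([], PySem.Set.empty)
  let vals := acc.1
  let wins := acc.2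
  if wins = [] then preferred_days
  else
    let windows := PySem.List.sorted wins (fun x => x)
    let svals := PySem.List.sorted vals (fun x => x)
    let lo : Option Int :=
      if minimum_count ≤ 0 then some preferred_days
      else if minimum_count ≤ (svals.length : Int) then
        some (max preferred_days (PySem.List.pyGetD svals (minimum_count - 1) 0))
      else none
    match lo with
    | some l =>
      let j := PySem.List.bisectLeft windows l
      if j < windows.length then PySem.List.pyGetD windows (j : Int) 0
      else PySem.List.pyGetD windows (-1) 0
    | none => PySem.List.pyGetD windows (-1) 0

-- ===== PRECONDITION & SPEC =====
def Spec_choose_window_days (candidates : List (List (String × Int))) (preferred_days : Int) (minimum_count : Int) (out : Int) : Prop := out = choose_window_days_alt candidates preferred_days minimum_count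
instance (candidates : List (List (String × Int))) (preferred_days : Int) (minimum_count : Int) (out : Int) : Decidable (Spec_choose_window_days candidates preferred_days minimum_count out) := by unfold Spec_choose_window_days; infer_instance

-- ===== CLAIM (what is proved, stated in full; the proofs are below) =====
def Claim_equal_choose_window_days : Prop := ∀ (candidates : List (List (String × Int))) (preferred_days : Int) (minimum_count : Int), Dom_choose_window_days candidates preferred_days minimum_count → Spec_choose_window_days candidates preferred_days minimum_count (choose_window_days candidates preferred_days minimum_count)

-- ===== LEMMAS AND PROOFS =====

theorem wd_foldl_pair (l : List (List (String × Int))) (a : List Int) (s : PySem.Set Int) :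
    l.foldl wdStep (a, s) = (a ++ l.map wdVal, ((l.filter wdTruthy).map wdVal).foldl PySem.Set.add s) := by
  induction l generalizing a s with
  | nil => simp
  | cons i t ih =>
    by_cases h : wdTruthy i
    · simp [wdStep, h, ih]
    · simp [wdStep, h, ih]

theorem wd_sorted_mono (ws : List Int) (h : ws.Pairwise (· ≤ ·)) {i j : Nat} (hij : i ≤ j) (hj : j < ws.length) :
    ws[i]'(lt_of_le_of_lt hij hj) ≤ ws[j] := by
  rcases eq_or_lt_of_le hij with rfl | hlt
  · exact le_refl _
  · exact List.pairwise_iff_getElem.mp h i j _ hj hlt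

theorem wd_le_getLast (ws : List Int) (h : ws.Pairwise (· ≤ ·)) (hne : ws ≠ []) (a : Int) (ha : a ∈ ws) :
    a ≤ ws.getLast hne := by
  obtain ⟨i, hi, rfl⟩ := List.mem_iff_getElem.mp ha
  rw [List.getLast_eq_getElem]
  exact wd_sorted_mono ws h (by omega) (by omega)

theorem wd_cnt_ge_iff (s : List Int) (hs : s.Pairwise (· ≤ ·)) (w : Int) (k : Nat) (hk : k < s.length) :
    (k + 1 ≤ s.countP (fun v => decide (v ≤ w))) ↔ s[k] ≤ w := by
  constructor
  · intro h
    by_contra hw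
    rw [not_le] at hw
    have hsplit : s.countP (fun v => decide (v ≤ w))
        = (s.take k).countP (fun v => decide (v ≤ w)) + (s.drop k).countP (fun v => decide (v ≤ w)) := by
      conv_lhs => rw [← List.take_append_drop k s]
      rw [List.countP_append]
    have hdrop : (s.drop k).countP (fun v => decide (v ≤ w)) = 0 := by
      rw [List.countP_eq_zero]
      intro a ha
      obtain ⟨i, hi, rfl⟩ := List.mem_iff_getElem.mp ha
      rw [List.getElem_drop]
      have hlen : k + i < s.length := by
        have := hi; simp [List.length_drop] at this; omega
      have h1 : s[k] ≤ s[k + i] := wd_sorted_mono s hs (by omega) hlen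
      simp only [decide_eq_true_eq]
      omega
    have htake : (s.take k).countP (fun v => decide (v ≤ w)) ≤ k := by
      calc (s.take k).countP (fun v => decide (v ≤ w)) ≤ (s.take k).length := List.countP_le_length
        _ ≤ k := by simp [List.length_take]
    omega
  · intro h
    have hlen : (s.take (k+1)).length = k + 1 := by
      simp [List.length_take]; omega
    have hall : ∀ a ∈ s.take (k+1), (fun v => decide (v ≤ w)) a = true := by
      intro a ha
      obtain ⟨i, hi, rfl⟩ := List.mem_iff_getElem.mp ha
      rw [List.getElem_take]
      have hik : i ≤ k := by simp [List.length_take] at hi; omega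
      have h1 : s[i]'(by omega) ≤ s[k] := wd_sorted_mono s hs hik hk
      simp only [decide_eq_true_eq]
      omega
    have htake : (s.take (k+1)).countP (fun v => decide (v ≤ w)) = k + 1 :=
      (List.countP_eq_length.mpr hall).trans hlen
    have hsplit : s.countP (fun v => decide (v ≤ w))
        = (s.take (k+1)).countP (fun v => decide (v ≤ w)) + (s.drop (k+1)).countP (fun v => decide (v ≤ w)) := by
      conv_lhs => rw [← List.take_append_drop (k+1) s]
      rw [List.countP_append]
    omega

theorem wd_find_ge_bisect (ws : List Int) (h : ws.Pairwise (· ≤ ·)) (l : Int) :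
    ws.find? (fun w => decide (l ≤ w)) =
      if hj : PySem.List.bisectLeft ws l < ws.length
      then some (ws[PySem.List.bisectLeft ws l]'hj) else none := by
  obtain ⟨hle, hlt, hge⟩ := PySem.List.bisectLeft_spec ws l h
  split
  · next hj =>
    rw [List.find?_eq_some_iff_getElem]
    refine ⟨by simpa using hge _ hj (le_refl _), PySem.List.bisectLeft ws l, hj, rfl, ?_⟩
    intro j hjlt
    have h1 : ws[j]'(lt_trans hjlt hj) < l := hlt j (lt_trans hjlt hj) hjlt
    simp only [Bool.not_eq_eq_eq_not, Bool.not_true, decide_eq_false_iff_not, not_le]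
    exact h1
  · next hj =>
    rw [List.find?_eq_none]
    intro x hx
    obtain ⟨i, hi, rfl⟩ := List.mem_iff_getElem.mp hx
    have h1 : ws[i] < l := hlt i hi (by omega)
    simp only [decide_eq_true_eq, not_le]
    exact h1

theorem wd_bisect_of_mem (ws : List Int) (h : ws.Pairwise (· ≤ ·)) (x : Int) (hx : x ∈ ws) :
    ∃ hj : PySem.List.bisectLeft ws x < ws.length, ws[PySem.List.bisectLeft ws x]'hj = x := by
  obtain ⟨hle, hlt, hge⟩ := PySem.List.bisectLeft_spec ws x h
  obtain ⟨i, hi, rfl⟩ := List.mem_iff_getElem.mp hx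
  have hji : PySem.List.bisectLeft ws ws[i] ≤ i := by
    by_contra hcon
    rw [not_le] at hcon
    exact absurd (hlt i hi hcon) (lt_irrefl _)
  have hjlen : PySem.List.bisectLeft ws ws[i] < ws.length := lt_of_le_of_lt hji hi
  exact ⟨hjlen, le_antisymm (wd_sorted_mono ws h hji hi) (hge _ hjlen (le_refl _))⟩

theorem wd_last_filter (p : Int → Bool) (l' : List Int) (b : Int) (hp : p b = true) :
    PySem.List.pyGetD ((l' ++ [b]).filter p) (-1) 0 = PySem.List.pyGetD (l' ++ [b]) (-1) 0 := by
  rw [List.filter_append]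
  simp only [List.filter_cons, hp, if_pos, List.filter_nil]
  rw [PySem.List.pyGetD_neg_one_append_singleton, PySem.List.pyGetD_neg_one_append_singleton]

-- the per-window candidate count equals the count on the sorted value list
theorem wd_cnt_eq (candidates : List (List (String × Int))) (w : Int) :
    (candidates.filter (fun item => decide (wdVal item ≤ w))).length
      = (PySem.List.sorted (candidates.map wdVal) (fun x => x)).countP (fun v => decide (v ≤ w)) := by
  rw [← List.countP_eq_length_filter]
  rw [List.Perm.countP_eq _ (PySem.List.sorted_perm (candidates.map wdVal) (fun x => x) false)]
  rw [List.countP_map]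
  rfl

theorem wd_find_main (ws : List Int) (hle : ws.Pairwise (· ≤ ·)) (p : Int) (q : Int → Bool) (l : Int)
    (hq : ∀ w, (decide (p ≤ w) && q w) = decide (l ≤ w)) :
    (ws.filter (fun w => decide (p ≤ w))).find? q =
      if hj : PySem.List.bisectLeft ws l < ws.length
      then some (ws[PySem.List.bisectLeft ws l]'hj) else none := by
  rw [List.find?_filter]
  rw [show (fun a => decide ((fun w => decide (p ≤ w)) a = true ∧ q a = true)) = fun w => decide (l ≤ w) from by
    funext a
    rw [← hq a]
    simp]
  exact wd_find_ge_bisect ws hle l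

theorem wd_fallback (ws : List Int) (hle : ws.Pairwise (· ≤ ·)) (hne : ws ≠ []) (p : Int) :
    (if ws.filter (fun w => decide (p ≤ w)) ≠ [] then PySem.List.pyGetD (ws.filter (fun w => decide (p ≤ w))) (-1) 0
      else PySem.List.pyGetD ws (-1) 0) = PySem.List.pyGetD ws (-1) 0 := by
  by_cases he : ws.filter (fun w => decide (p ≤ w)) = []
  · simp [he]
  · rw [if_pos he]
    obtain ⟨x, hx⟩ := List.exists_mem_of_ne_nil _ he
    rw [List.mem_filter] at hx
    rcases List.eq_nil_or_concat ws with rfl | ⟨l', b, hws⟩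
    · exact absurd rfl hne
    · rw [List.concat_eq_append] at hws
      subst hws
      have hgl : (l' ++ [b]).getLast hne = b := by simp
      have hxb : x ≤ (l' ++ [b]).getLast hne := wd_le_getLast _ hle hne x hx.1
      have hpb : p ≤ b := le_trans (by simpa using hx.2) (hgl ▸ hxb)
      exact wd_last_filter _ l' b (by simpa using hpb)

theorem wd_getD_nat (ws : List Int) (j : Nat) (hj : j < ws.length) :
    PySem.List.pyGetD ws (j : Int) 0 = ws[j] := by
  rw [PySem.List.pyGetD_natCast, List.getD_eq_getElem ws 0 hj]

-- ===== VERDICT (by name: the statement is the Claim_ definition above) =====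
theorem choose_window_days_spec : Claim_equal_choose_window_days := by
  intro candidates preferred_days minimum_count _
  unfold Spec_choose_window_days choose_window_days choose_window_days_alt
  rw [wd_foldl_pair]
  simp only [List.nil_append]
  have hfold : ((candidates.filter wdTruthy).map wdVal).foldl PySem.Set.add PySem.Set.empty
      = PySem.Set.ofList ((candidates.filter wdTruthy).map wdVal) := rfl
  rw [hfold]
  set L := (candidates.filter wdTruthy).map wdVal with hL
  by_cases hemp : PySem.Set.ofList L = []
  · rw [hemp]
    have hnil : (PySem.List.sorted ([] : List Int) (fun x => x)) = [] := rfl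
    simp [hnil]
  · have hWne : PySem.List.sorted (PySem.Set.ofList L) (fun x => x) ≠ [] := by
      simp only [ne_eq, PySem.List.sorted_eq_nil_iff]; exact hemp
    rw [if_neg hWne, if_neg hemp]
    set ws := PySem.List.sorted (PySem.Set.ofList L) (fun x => x) with hwsdef
    set sv := PySem.List.sorted (candidates.map wdVal) (fun x => x) with hsvdef
    have hplt : ws.Pairwise (· < ·) := by
      rw [hwsdef]; exact PySem.List.sorted_ofList_pairwise_lt L
    have hle : ws.Pairwise (· ≤ ·) := hplt.imp (fun h => le_of_lt h)
    have hsvle : sv.Pairwise (· ≤ ·) := by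
      rw [hsvdef]; exact PySem.List.sorted_pairwise (candidates.map wdVal) (fun x => x)
    have hcnt : ∀ w : Int, ((candidates.filter (fun item => decide (wdVal item ≤ w))).length)
        = sv.countP (fun v => decide (v ≤ w)) := by
      intro w; rw [hsvdef]; exact wd_cnt_eq candidates w
    have hsvlen : sv.length = candidates.length := by
      rw [hsvdef, (PySem.List.sorted_perm (candidates.map wdVal) (fun x => x) false).length_eq,
        List.length_map]
    have hne2 : ws ≠ [] := hWne
    by_cases hm0 : minimum_count ≤ 0
    · -- minimum_count <= 0: every cumulative count qualifies; lo = some preferred_days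
      rw [if_pos hm0]
      simp only []
      have hq : ∀ w : Int, (decide (preferred_days ≤ w) && decide (minimum_count ≤ ((candidates.filter (fun item => decide (wdVal item ≤ w))).length : Int))) = decide (preferred_days ≤ w) := by
        intro w
        have h1 : minimum_count ≤ ((candidates.filter (fun item => decide (wdVal item ≤ w))).length : Int) :=
          le_trans hm0 (Int.natCast_nonneg _)
        rw [decide_eq_true h1, Bool.and_true]
      by_cases hmem : preferred_days ∈ ws
      · rw [if_pos ⟨hmem, le_trans hm0 (Int.natCast_nonneg _)⟩]
        obtain ⟨hj, hwj⟩ := wd_bisect_of_mem ws hle preferred_days hmem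
        rw [if_pos hj, wd_getD_nat ws _ hj, hwj]
      · rw [if_neg (fun hc => hmem hc.1)]
        rw [wd_find_main ws hle preferred_days _ preferred_days hq]
        by_cases hj : PySem.List.bisectLeft ws preferred_days < ws.length
        · rw [dif_pos hj]
          simp only []
          rw [if_pos hj, wd_getD_nat ws _ hj]
        · rw [dif_neg hj]
          simp only []
          rw [if_neg hj]
          exact wd_fallback ws hle hne2 preferred_days
    · by_cases hmn : minimum_count ≤ (sv.length : Int)
      · -- 0 < minimum_count ≤ len(vals): threshold value t = svals[minimum_count-1]
        rw [if_neg hm0, if_pos hmn]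
        simp only []
        have hklen : (minimum_count - 1).toNat < sv.length := by omega
        have hT : PySem.List.pyGetD sv (minimum_count - 1) 0 = sv[(minimum_count - 1).toNat] :=
          PySem.List.pyGetD_eq_getElem sv 0 (by omega) (by omega)
        rw [hT]
        have hsat : ∀ w : Int, (minimum_count ≤ ((candidates.filter (fun item => decide (wdVal item ≤ w))).length : Int)) ↔ sv[(minimum_count - 1).toNat] ≤ w := by
          intro w
          rw [hcnt w]
          constructor
          · intro h
            exact (wd_cnt_ge_iff sv hsvle w _ hklen).mp (by omega)
          · intro h
            have h2 := (wd_cnt_ge_iff sv hsvle w _ hklen).mpr h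
            omega
        have hq : ∀ w : Int, (decide (preferred_days ≤ w) && decide (minimum_count ≤ ((candidates.filter (fun item => decide (wdVal item ≤ w))).length : Int))) = decide (max preferred_days sv[(minimum_count - 1).toNat] ≤ w) := by
          intro w
          rw [show decide (minimum_count ≤ ((candidates.filter (fun item => decide (wdVal item ≤ w))).length : Int)) = decide (sv[(minimum_count - 1).toNat] ≤ w) from decide_eq_decide.mpr (hsat w)]
          rw [← Bool.decide_and, decide_eq_decide]
          exact max_le_iff.symm
        by_cases hpb : preferred_days ∈ ws ∧ sv[(minimum_count - 1).toNat] ≤ preferred_days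
        · rw [if_pos ⟨hpb.1, (hsat preferred_days).mpr hpb.2⟩]
          rw [max_eq_left hpb.2]
          obtain ⟨hj, hwj⟩ := wd_bisect_of_mem ws hle preferred_days hpb.1
          rw [if_pos hj, wd_getD_nat ws _ hj, hwj]
        · rw [if_neg (fun hc => hpb ⟨hc.1, (hsat preferred_days).mp hc.2⟩)]
          rw [wd_find_main ws hle preferred_days _ (max preferred_days sv[(minimum_count - 1).toNat]) hq]
          by_cases hj : PySem.List.bisectLeft ws (max preferred_days sv[(minimum_count - 1).toNat]) < ws.length
          · rw [dif_pos hj]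
            simp only []
            rw [if_pos hj, wd_getD_nat ws _ hj]
          · rw [dif_neg hj]
            simp only []
            rw [if_neg hj]
            exact wd_fallback ws hle hne2 preferred_days
      · -- minimum_count > len(vals): no window ever qualifies; lo = none
        rw [if_neg hm0, if_neg hmn]
        simp only []
        have hcfalse : ∀ w : Int, ¬ (minimum_count ≤ ((candidates.filter (fun item => decide (wdVal item ≤ w))).length : Int)) := by
          intro w
          have h1 : (candidates.filter (fun item => decide (wdVal item ≤ w))).length ≤ candidates.length :=
            List.length_filter_le _ _
          omega
        rw [if_neg (fun hc => hcfalse _ hc.2)]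
        have hfind : (ws.filter (fun w => decide (preferred_days ≤ w))).find? (fun w => decide (minimum_count ≤ ((candidates.filter (fun item => decide (wdVal item ≤ w))).length : Int))) = none := by
          rw [List.find?_eq_none]
          intro x _
          simp only [decide_eq_true_eq]
          exact hcfalse x
        rw [hfind]
        exact wd_fallback ws hle hne2 preferred_days
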